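-- pv_equiv track=rewrite | github.com/5l1v3r1/StoryPointsEstimation | convert to csv.py | SimpleOverSample
-- ===== SOURCE A (Python) =====
-- from collections import Counter
--
-- def SimpleOverSample(_xtrain, _ytrain):
--     xtrain = list(_xtrain)
--     ytrain = list(_ytrain)
--
--     samples_counter = Counter(ytrain)
--     max_samples = sorted(samples_counter.values(), reverse=True)[0]
--     for sc in samples_counter:
--         init_samples = samples_counter[sc]
--         samples_to_add = max_samples - init_samples
--         if samples_to_add > 0:
--             # collect indices to oversample for the current class
--             index = list()
--             for i in range(len(ytrain)):
--                 if (ytrain[i] == sc):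
--                     index.append(i)
--             # select samples to copy for the current class
--             copy_from = [xtrain[i] for i in index]
--             index_copy = 0
--             for i in range(samples_to_add):
--                 xtrain.append(copy_from[index_copy % len(copy_from)])
--                 ytrain.append(sc)
--                 index_copy += 1
--     return xtrain, ytrain
-- ===== SOURCE B (Python) =====
-- def SimpleOverSample(_xtrain, _ytrain):
--     # group: class -> ordered list of its indices in _ytrain (one pass)
--     groups = {}
--     for i, c in enumerate(_ytrain):
--         groups[c] = groups.get(c, []) + [i]
--     max_samples = sorted((len(g) for g in groups.values()), reverse=True)[0]
--     xtail, ytail = [], []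
--     for c, idxs in groups.items():
--         to_add = max_samples - len(idxs)
--         if to_add > 0:
--             samples = [_xtrain[i] for i in idxs]
--             reps = -(-to_add // len(samples))
--             xtail += (samples * reps)[:to_add]
--             ytail += [c] * to_add
--     return list(_xtrain) + xtail, list(_ytrain) + ytail
-- ===== Notes on version B (the rewrite author's own statement) =====
-- stated objective: faster
-- what changed: Replaces A's per-class rescans of ytrain and element-by-element cyclic append loop by one grouping pass (class -> index list) followed by a bulk repeat-and-slice fill per minority class; Pre_ excludes the empty ytrain (A raises IndexError) and ytrain-longer-than-xtrain inputs with a minority class, where A reads from its own partially-oversampled xtrain while B raises IndexError.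
-- outside the precondition, e.g. on SimpleOverSample([0, -35], [2, 1, 0, 1]): A returns ([0, -35, 0, 0], [2, 1, 0, 1, 2, 0]), B raises IndexError; on SimpleOverSample([], [1, 1, 2]): A raises IndexError, B raises IndexError
import Mathlib
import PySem

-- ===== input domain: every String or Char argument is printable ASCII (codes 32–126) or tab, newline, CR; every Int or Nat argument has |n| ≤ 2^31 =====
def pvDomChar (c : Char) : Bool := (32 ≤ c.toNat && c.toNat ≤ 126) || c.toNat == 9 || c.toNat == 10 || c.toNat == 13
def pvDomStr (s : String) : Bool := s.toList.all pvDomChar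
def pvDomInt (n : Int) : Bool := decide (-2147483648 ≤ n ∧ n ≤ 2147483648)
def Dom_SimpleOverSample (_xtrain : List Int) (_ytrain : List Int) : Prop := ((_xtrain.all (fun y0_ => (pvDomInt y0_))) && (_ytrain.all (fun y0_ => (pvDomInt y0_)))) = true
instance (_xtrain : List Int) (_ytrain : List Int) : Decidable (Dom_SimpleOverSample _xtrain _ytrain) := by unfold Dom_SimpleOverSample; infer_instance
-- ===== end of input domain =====

-- B replaces A's per-class rescans and element-by-element cyclic copy loop by one grouping
-- pass (class -> index list) plus a bulk repeat-and-slice fill per minority class (the timing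
-- run measured B faster); neither implementation mutates its arguments' callers' lists.


-- ===== PORT A =====
-- literal transliteration of Source A; `index_copy` always equals the inner loop counter `i`
-- and is ported as that loop variable; pyGetD's default 0 is only reachable outside Pre_.
def SimpleOverSample (_xtrain : List Int) (_ytrain : List Int) : List Int × List Int :=
  let xtrain := _xtrain
  let ytrain := _ytrain
  let samplesCounter := PySem.Dict.counter ytrain
  let maxSamples :=
    (PySem.List.pyGet? (PySem.List.sorted samplesCounter.values (fun v => v) true) 0).getD 0
  samplesCounter.keys.foldl (fun st sc =>
    let initSamples := samplesCounter.getD sc 0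
    let samplesToAdd := maxSamples - initSamples
    if samplesToAdd > 0 then
      let index := (PySem.List.pyRange 0 (PySem.List.len st.2) 1).foldl
        (fun acc i => if PySem.List.pyGetD st.2 i 0 == sc then acc ++ [i] else acc) []
      let copyFrom := index.map (fun i => PySem.List.pyGetD st.1 i 0)
      (PySem.List.pyRange 0 samplesToAdd 1).foldl
        (fun st2 indexCopy =>
          (st2.1 ++ [PySem.List.pyGetD copyFrom
                      (PySem.Int.mod indexCopy (PySem.List.len copyFrom)) 0],
           st2.2 ++ [sc])) st
    else st) (xtrain, ytrain)

-- ===== PORT B =====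
-- literal transliteration of Source B; Python's `samples * reps` (list repetition) has no PySem
-- primitive and is ported by hand as flatten ∘ replicate, exact for every reps (negative reps
-- and Python's empty result both give []).
def SimpleOverSample_alt (_xtrain : List Int) (_ytrain : List Int) : List Int × List Int :=
  let groups : PySem.Dict Int (List Int) :=
    (PySem.List.enumerate _ytrain).foldl
      (fun g p => g.modify p.2 [] (fun l => l ++ [p.1])) PySem.Dict.empty
  let maxSamples :=
    (PySem.List.pyGet? (PySem.List.sorted (groups.values.map (fun g => (g.length : Int)))
      (fun v => v) true) 0).getD 0
  let tails := groups.items.foldl (fun t p =>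
    let toAdd := maxSamples - (p.2.length : Int)
    if toAdd > 0 then
      let samples := p.2.map (fun i => PySem.List.pyGetD _xtrain i 0)
      let reps := -(PySem.Int.floordiv (-toAdd) (samples.length : Int))
      (t.1 ++ PySem.List.slice (List.flatten (List.replicate reps.toNat samples)) none (some toAdd),
       t.2 ++ List.replicate toAdd.toNat p.1)
    else t) ([], [])
  (_xtrain ++ tails.1, _ytrain ++ tails.2)

-- ===== PRECONDITION & SPEC =====
-- Pre_ excludes the empty ytrain (A raises IndexError) and the mismatched-length inputs with
-- some minority class (ytrain longer than xtrain and not all class counts equal): there A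
-- indexes into its own partially-oversampled xtrain — returning values read from appended
-- copies or raising — while B raises IndexError.
def Pre_SimpleOverSample (_xtrain : List Int) (_ytrain : List Int) : Prop :=
  _ytrain ≠ [] ∧ (_ytrain.length ≤ _xtrain.length ∨
    ∀ a ∈ _ytrain, ∀ b ∈ _ytrain, _ytrain.count a = _ytrain.count b)
instance (_xtrain : List Int) (_ytrain : List Int) : Decidable (Pre_SimpleOverSample _xtrain _ytrain) := by
  unfold Pre_SimpleOverSample; infer_instance
def pvWitness_SimpleOverSample : List Int × List Int := ([3, 4, 5], [7, 7, 9])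
def Spec_SimpleOverSample (_xtrain : List Int) (_ytrain : List Int) (out : List Int × List Int) : Prop := out = SimpleOverSample_alt _xtrain _ytrain
instance (_xtrain : List Int) (_ytrain : List Int) (out : List Int × List Int) : Decidable (Spec_SimpleOverSample _xtrain _ytrain out) := by unfold Spec_SimpleOverSample; infer_instance

-- ===== CLAIM (what is proved, stated in full; the proofs are below) =====
def Claim_equal_SimpleOverSample : Prop := ∀ (_xtrain : List Int) (_ytrain : List Int), Dom_SimpleOverSample _xtrain _ytrain → Pre_SimpleOverSample _xtrain _ytrain → Spec_SimpleOverSample _xtrain _ytrain (SimpleOverSample _xtrain _ytrain)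

-- ===== LEMMAS AND PROOFS =====

-- the list of positions of c in y0 (as Python ints, in order of occurrence)
def pvIdx (y0 : List Int) (c : Int) : List Int :=
  ((PySem.List.enumerate y0).filter (fun p => p.2 == c)).map (fun p => p.1)

-- the x- and y-blocks appended for class c when the max class count is M
def pvBlockX (x0 y0 : List Int) (M : Int) (c : Int) : List Int :=
  if M - (y0.count c : Int) > 0 then
    (PySem.List.pyRange 0 (M - (y0.count c : Int)) 1).map
      (fun i => PySem.List.pyGetD ((pvIdx y0 c).map (fun j => PySem.List.pyGetD x0 j 0))
        (PySem.Int.mod i ((((pvIdx y0 c).map (fun j => PySem.List.pyGetD x0 j 0)).length : Int))) 0)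
  else []
def pvBlockY (y0 : List Int) (M : Int) (c : Int) : List Int :=
  if M - (y0.count c : Int) > 0 then List.replicate (M - (y0.count c : Int)).toNat c else []

-- the shared value of both programs' max_samples
def pvM (y0 : List Int) : Int :=
  (PySem.List.pyGet? (PySem.List.sorted ((PySem.Set.ofList y0).map (fun k => (y0.count k : Int)))
    (fun v => v) true) 0).getD 0

theorem pv_mem_idx (y0 : List Int) (c i : Int) (h : i ∈ pvIdx y0 c) :
    0 ≤ i ∧ i < (y0.length : Int) ∧ PySem.List.pyGetD y0 i 0 = c := by
  simp only [pvIdx, List.mem_map, List.mem_filter] at h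
  obtain ⟨p, ⟨hpe, hpc⟩, hpi⟩ := h
  rw [PySem.List.mem_enumerate_iff] at hpe
  obtain ⟨k, hk, rfl⟩ := hpe
  simp only [beq_iff_eq] at hpc
  subst hpi
  refine ⟨by simp, by simp; exact_mod_cast hk, ?_⟩
  simp only [zero_add]
  rw [PySem.List.pyGetD_natCast, List.getD_eq_getElem y0 0 hk]
  exact hpc

theorem pv_idx_length (y0 : List Int) (c : Int) : (pvIdx y0 c).length = y0.count c := by
  have h := List.countP_map (p := fun x : Int => x == c) (f := fun p : Int × Int => p.2)
    (l := PySem.List.enumerate y0 0)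
  rw [PySem.List.map_snd_enumerate] at h
  unfold pvIdx
  rw [List.length_map, ← List.countP_eq_length_filter]
  exact h.symm

theorem pv_idx_ne_nil (y0 : List Int) (c : Int) (h : c ∈ y0) : pvIdx y0 c ≠ [] := by
  have h1 : (pvIdx y0 c).length ≠ 0 := by
    rw [pv_idx_length]
    exact Nat.pos_iff_ne_zero.mp (List.count_pos_iff.mpr h)
  intro hnil
  exact h1 (by simp [hnil])

theorem pv_getD_append (xs t : List Int) (i : Int) (h0 : 0 ≤ i) (h1 : i < (xs.length : Int)) :
    PySem.List.pyGetD (xs ++ t) i 0 = PySem.List.pyGetD xs i 0 := by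
  have hlt : i.toNat < xs.length := by omega
  rw [PySem.List.pyGetD_eq_getElem _ _ h0 (by simp; omega),
      PySem.List.pyGetD_eq_getElem _ _ h0 (by exact_mod_cast h1)]
  exact List.getElem_append_left hlt

-- A's index-collecting scan of the partially extended ytrain finds exactly the
-- original positions of c, because every appended label differs from c
theorem pv_scan (y0 ey : List Int) (c : Int) (hc : c ∉ ey) :
    (PySem.List.pyRange 0 (PySem.List.len (y0 ++ ey)) 1).foldl
      (fun acc i => if PySem.List.pyGetD (y0 ++ ey) i 0 == c then acc ++ [i] else acc) []
    = pvIdx y0 c := by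
  rw [PySem.List.foldl_append_if (fun i => PySem.List.pyGetD (y0 ++ ey) i 0 == c) (fun i => i)]
  rw [List.nil_append]
  rw [show PySem.List.len (y0 ++ ey) = ((y0.length + ey.length : Nat) : Int) by
        simp [PySem.List.len_eq]]
  rw [PySem.List.pyRange_one_append 0 (y0.length : Int) _ (by positivity)
    (by exact_mod_cast Nat.le_add_right _ _)]
  rw [List.filter_append, List.map_append]
  have h2 : (PySem.List.pyRange (y0.length : Int) ((y0.length + ey.length : Nat) : Int) 1).filter
      (fun i => PySem.List.pyGetD (y0 ++ ey) i 0 == c) = [] := by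
    rw [List.filter_eq_nil_iff]
    intro j hj
    rw [PySem.List.mem_pyRange_one] at hj
    obtain ⟨hj1, hj2⟩ := hj
    have h0j : (0 : Int) ≤ j := le_trans (by positivity) hj1
    rw [PySem.List.pyGetD_eq_getElem _ _ h0j (by simp; omega)]
    have hge : y0.length ≤ j.toNat := by omega
    rw [List.getElem_append_right hge]
    simp only [beq_iff_eq]
    intro heq
    exact hc (heq ▸ List.getElem_mem _)
  rw [h2]
  simp only [List.map_nil, List.append_nil]
  unfold pvIdx
  rw [PySem.List.enumerate_eq_map_pyRange y0 0, List.filter_map, List.map_map]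
  rw [show PySem.List.len y0 = (y0.length : Int) from by simp [PySem.List.len_eq]]
  have hcongr : List.filter (fun i => PySem.List.pyGetD (y0 ++ ey) i 0 == c)
      (PySem.List.pyRange 0 (y0.length : Int))
      = List.filter ((fun p : Int × Int => p.2 == c) ∘ fun j => (j, PySem.List.pyGetD y0 j 0))
        (PySem.List.pyRange 0 (y0.length : Int)) := by
    apply List.filter_congr
    intro j hj
    rw [PySem.List.mem_pyRange_one] at hj
    simp only [Function.comp]
    rw [pv_getD_append y0 ey j hj.1 hj.2]
  rw [hcongr]
  simp [Function.comp_def]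

theorem pv_flatten_replicate_getElem? (s : List Int) (m k : Nat) (hk : k < m * s.length) :
    (List.replicate m s).flatten[k]? = s[k % s.length]? := by
  induction m generalizing k with
  | zero => simp at hk
  | succ m ih =>
    rw [List.replicate_succ, List.flatten_cons]
    rw [Nat.succ_mul] at hk
    by_cases h : k < s.length
    · rw [List.getElem?_append_left h, Nat.mod_eq_of_lt h]
    · rw [Nat.not_lt] at h
      rw [List.getElem?_append_right h, ih (k - s.length) (by omega)]
      rw [Nat.mod_eq_sub_mod h]

-- B's repeat-and-slice fill equals A's cyclic indexing, element by element
theorem pv_cyclic_fill (s : List Int) (n : Int) (hs : s ≠ []) (hn : 0 < n) :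
    PySem.List.slice
      (List.flatten (List.replicate (-(PySem.Int.floordiv (-n) ((s.length : Nat) : Int))).toNat s))
      none (some n)
    = (PySem.List.pyRange 0 n 1).map
        (fun i => PySem.List.pyGetD s (PySem.Int.mod i ((s.length : Nat) : Int)) 0) := by
  have hL : 0 < s.length := List.length_pos_iff.mpr hs
  have hLpos : (0 : Int) < (s.length : Int) := by exact_mod_cast hL
  obtain ⟨hq1, hq2⟩ :=
    (PySem.Int.neg_floordiv_neg_eq_iff_of_pos (a := n) (b := (s.length : Int)) hLpos).mp rfl
  set r : Int := -PySem.Int.floordiv (-n) (s.length : Int) with hr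
  have hrpos : 0 < r := by nlinarith
  have hcast : ((r.toNat * s.length : Nat) : Int) = r * (s.length : Int) := by
    push_cast [Int.toNat_of_nonneg hrpos.le]
    ring
  have hnr : n.toNat ≤ r.toNat * s.length := by
    have := Int.toNat_le_toNat hq2
    rwa [← hcast, Int.toNat_natCast] at this
  rw [PySem.List.slice_to _ hn.le]
  apply List.ext_getElem?
  intro k
  rw [List.getElem?_take]
  rw [List.getElem?_map]
  by_cases hk : k < n.toNat
  · rw [if_pos hk]
    rw [pv_flatten_replicate_getElem? s r.toNat k (by omega)]
    have hklt : k % s.length < s.length := Nat.mod_lt _ hL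
    rw [List.getElem?_eq_getElem hklt]
    rw [PySem.List.getElem?_pyRange_one]
    rw [if_pos (by simpa using hk)]
    simp only [Option.map_some, zero_add]
    rw [show ((k : Int)) = ((k : Nat) : Int) from rfl]
    rw [PySem.Int.mod_natCast, PySem.List.pyGetD_natCast, List.getD_eq_getElem s 0 hklt]
  · rw [if_neg hk]
    rw [PySem.List.getElem?_pyRange_one]
    rw [if_neg (by simpa using hk)]
    rfl

theorem pv_inner_loop (g : Int → Int) (c : Int) (n : Int) (a b : List Int) :
    (PySem.List.pyRange 0 n 1).foldl
      (fun st2 indexCopy => (st2.1 ++ [g indexCopy], st2.2 ++ [c])) (a, b)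
    = (a ++ (PySem.List.pyRange 0 n 1).map g, b ++ List.replicate n.toNat c) := by
  rw [PySem.List.foldl_prod_mk (fun s e => s ++ [g e]) (fun s _ => s ++ [c])]
  rw [PySem.List.foldl_append_singleton_eq_map]
  rw [PySem.List.foldl_append_singleton_eq_map (fun _ => c)]
  rw [List.map_const', PySem.List.length_pyRange_one]
  simp

-- A's outer loop over the Counter's keys, with the partially extended training lists
-- as explicit state: every processed key contributes its two blocks
theorem pv_A_fold (x0 y0 : List Int) (M : Int) (ks : List Int) (ex ey : List Int)
    (hnd : ks.Nodup) (hey : ∀ e ∈ ey, e ∉ ks)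
    (hc : ∀ c ∈ ks, M - (y0.count c : Int) > 0 →
      (c ∈ y0 ∧ ∀ i ∈ pvIdx y0 c, i < (x0.length : Int))) :
    ks.foldl (fun st sc =>
      if M - (PySem.Dict.counter y0).getD sc 0 > 0 then
        (PySem.List.pyRange 0 (M - (PySem.Dict.counter y0).getD sc 0) 1).foldl
          (fun st2 indexCopy =>
            (st2.1 ++ [PySem.List.pyGetD
                (((PySem.List.pyRange 0 (PySem.List.len st.2) 1).foldl
                    (fun acc i => if PySem.List.pyGetD st.2 i 0 == sc then acc ++ [i] else acc) []).map
                  (fun i => PySem.List.pyGetD st.1 i 0))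
                (PySem.Int.mod indexCopy (PySem.List.len
                  (((PySem.List.pyRange 0 (PySem.List.len st.2) 1).foldl
                      (fun acc i => if PySem.List.pyGetD st.2 i 0 == sc then acc ++ [i] else acc) []).map
                    (fun i => PySem.List.pyGetD st.1 i 0)))) 0],
             st2.2 ++ [sc])) st
      else st) (x0 ++ ex, y0 ++ ey)
    = (x0 ++ ex ++ ks.flatMap (pvBlockX x0 y0 M), y0 ++ ey ++ ks.flatMap (pvBlockY y0 M)) := by
  induction ks generalizing ex ey with
  | nil => simp
  | cons c ks ih =>
    rw [List.foldl_cons]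
    have hcne : c ∉ ey := fun h => hey c h (List.mem_cons_self ..)
    have hstep :
        (if M - (PySem.Dict.counter y0).getD c 0 > 0 then
          (PySem.List.pyRange 0 (M - (PySem.Dict.counter y0).getD c 0) 1).foldl
            (fun st2 indexCopy =>
              (st2.1 ++ [PySem.List.pyGetD
                  (((PySem.List.pyRange 0 (PySem.List.len (x0 ++ ex, y0 ++ ey).2) 1).foldl
                      (fun acc i => if PySem.List.pyGetD (x0 ++ ex, y0 ++ ey).2 i 0 == c then acc ++ [i] else acc) []).map
                    (fun i => PySem.List.pyGetD (x0 ++ ex, y0 ++ ey).1 i 0))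
                  (PySem.Int.mod indexCopy (PySem.List.len
                    (((PySem.List.pyRange 0 (PySem.List.len (x0 ++ ex, y0 ++ ey).2) 1).foldl
                        (fun acc i => if PySem.List.pyGetD (x0 ++ ex, y0 ++ ey).2 i 0 == c then acc ++ [i] else acc) []).map
                      (fun i => PySem.List.pyGetD (x0 ++ ex, y0 ++ ey).1 i 0)))) 0],
               st2.2 ++ [c])) (x0 ++ ex, y0 ++ ey)
        else (x0 ++ ex, y0 ++ ey))
        = (x0 ++ (ex ++ pvBlockX x0 y0 M c), y0 ++ (ey ++ pvBlockY y0 M c)) := by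
      rw [PySem.Dict.getD_counter]
      simp only [pv_scan y0 ey c hcne]
      by_cases hpos : M - (y0.count c : Int) > 0
      · rw [if_pos hpos]
        obtain ⟨hcy, hbound⟩ := hc c (List.mem_cons_self ..) hpos
        have hmap : (pvIdx y0 c).map (fun i => PySem.List.pyGetD (x0 ++ ex, y0 ++ ey).1 i 0)
            = (pvIdx y0 c).map (fun i => PySem.List.pyGetD x0 i 0) := by
          apply List.map_congr_left
          intro i hi
          exact pv_getD_append x0 ex i (pv_mem_idx y0 c i hi).1 (hbound i hi)
        simp only [hmap]
        rw [pv_inner_loop]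
        rw [pvBlockX, pvBlockY, if_pos hpos, if_pos hpos]
        simp [PySem.List.len_eq, List.append_assoc]
      · rw [if_neg hpos]
        rw [pvBlockX, pvBlockY, if_neg hpos, if_neg hpos]
        simp
    rw [hstep]
    rw [ih (ex ++ pvBlockX x0 y0 M c) (ey ++ pvBlockY y0 M c)
      (List.nodup_cons.mp hnd).2
      (by
        intro e he
        rcases List.mem_append.mp he with h | h
        · exact fun hk => hey e h (List.mem_cons_of_mem _ hk)
        · have : e = c := by
            unfold pvBlockY at h
            split at h
            · exact List.eq_of_mem_replicate h
            · cases h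
          subst this
          exact (List.nodup_cons.mp hnd).1)
      (fun k hk => hc k (List.mem_cons_of_mem _ hk))]
    simp [List.flatMap_cons, List.append_assoc]

-- B's single pass over the grouped items
theorem pv_B_fold (x0 y0 : List Int) (M : Int) (ks : List Int) (a b : List Int)
    (hks : ∀ c ∈ ks, c ∈ y0) :
    (ks.map (fun k => (k, pvIdx y0 k))).foldl (fun t p =>
      if M - (p.2.length : Int) > 0 then
        (t.1 ++ PySem.List.slice
            (List.flatten (List.replicate
              (-(PySem.Int.floordiv (-(M - (p.2.length : Int)))
                  (((p.2.map (fun i => PySem.List.pyGetD x0 i 0)).length : Int)))).toNat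
              (p.2.map (fun i => PySem.List.pyGetD x0 i 0)))) none (some (M - (p.2.length : Int))),
         t.2 ++ List.replicate (M - (p.2.length : Int)).toNat p.1)
      else t) (a, b)
    = (a ++ ks.flatMap (pvBlockX x0 y0 M), b ++ ks.flatMap (pvBlockY y0 M)) := by
  induction ks generalizing a b with
  | nil => simp
  | cons c ks ih =>
    rw [List.map_cons, List.foldl_cons]
    have hcy : c ∈ y0 := hks c (List.mem_cons_self ..)
    have hlen : (((c, pvIdx y0 c) : Int × List Int).2.length : Int) = (y0.count c : Int) := by
      simp [pv_idx_length]
    have hstep :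
        (if M - (((c, pvIdx y0 c) : Int × List Int).2.length : Int) > 0 then
          ((a, b).1 ++ PySem.List.slice
              (List.flatten (List.replicate
                (-(PySem.Int.floordiv (-(M - (((c, pvIdx y0 c) : Int × List Int).2.length : Int)))
                    ((((c, pvIdx y0 c) : Int × List Int).2.map (fun i => PySem.List.pyGetD x0 i 0)).length : Int))).toNat
                (((c, pvIdx y0 c) : Int × List Int).2.map (fun i => PySem.List.pyGetD x0 i 0)))) none
              (some (M - (((c, pvIdx y0 c) : Int × List Int).2.length : Int))),
           (a, b).2 ++ List.replicate (M - (((c, pvIdx y0 c) : Int × List Int).2.length : Int)).toNat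
              ((c, pvIdx y0 c) : Int × List Int).1)
        else (a, b))
        = (a ++ pvBlockX x0 y0 M c, b ++ pvBlockY y0 M c) := by
      simp only [hlen]
      by_cases hpos : M - (y0.count c : Int) > 0
      · rw [if_pos hpos]
        have hsne : ((pvIdx y0 c).map (fun i => PySem.List.pyGetD x0 i 0)) ≠ [] := by
          intro h
          exact pv_idx_ne_nil y0 c hcy (List.map_eq_nil_iff.mp h)
        rw [pv_cyclic_fill _ _ hsne hpos]
        rw [pvBlockX, pvBlockY, if_pos hpos, if_pos hpos]
      · rw [if_neg hpos]
        rw [pvBlockX, pvBlockY, if_neg hpos, if_neg hpos]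
        simp
    rw [hstep]
    rw [ih (a ++ pvBlockX x0 y0 M c) (b ++ pvBlockY y0 M c)
      (fun k hk => hks k (List.mem_cons_of_mem _ hk))]
    simp [List.flatMap_cons, List.append_assoc]

theorem pv_groups_getD (y0 : List Int) (c : Int) :
    ((PySem.List.enumerate y0).foldl
      (fun g p => g.modify p.2 [] (fun l => l ++ [p.1])) PySem.Dict.empty).getD c []
    = pvIdx y0 c := by
  rw [show (PySem.List.enumerate y0).foldl
        (fun g p => g.modify p.2 [] (fun l => l ++ [p.1])) PySem.Dict.empty
      = ((PySem.List.enumerate y0).map (fun p => (p.2, p.1))).foldl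
        (fun g q => g.modify q.1 [] (fun l => l ++ [q.2])) PySem.Dict.empty from by
    rw [List.foldl_map]]
  rw [PySem.Dict.getD_foldl_modify_append]
  rw [List.filter_map, List.map_map]
  simp only [PySem.Dict.getD_empty, List.nil_append]
  rfl

theorem pv_groups_keys (y0 : List Int) :
    ((PySem.List.enumerate y0).foldl
      (fun g p => g.modify p.2 [] (fun l => l ++ [p.1])) PySem.Dict.empty).keys
    = PySem.Set.ofList y0 := by
  have h := PySem.Dict.keys_foldl_modify_key (PySem.List.enumerate y0)
    (fun p : Int × Int => p.2) [] (fun _ p => fun l => l ++ [p.1]) PySem.Dict.empty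
  simp only [PySem.Dict.keys_empty, PySem.List.map_snd_enumerate] at h
  exact h

theorem pv_groups_items (y0 : List Int) :
    ((PySem.List.enumerate y0).foldl
      (fun g p => g.modify p.2 [] (fun l => l ++ [p.1])) PySem.Dict.empty).items
    = (PySem.Set.ofList y0).map (fun k => (k, pvIdx y0 k)) := by
  have hnod : ((PySem.List.enumerate y0).foldl
      (fun g p => g.modify p.2 [] (fun l => l ++ [p.1])) PySem.Dict.empty).keys.Nodup := by
    rw [pv_groups_keys]
    exact PySem.Set.nodup_ofList y0
  rw [PySem.Dict.items_eq_map_keys _ hnod []]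
  rw [pv_groups_keys]
  apply List.map_congr_left
  intro k _
  rw [pv_groups_getD]

theorem pv_counter_values (y0 : List Int) :
    (PySem.Dict.counter y0).values = (PySem.Set.ofList y0).map (fun k => (y0.count k : Int)) := by
  rw [PySem.Dict.values_eq_map_keys _ (PySem.Dict.nodup_keys_counter y0) 0]
  rw [PySem.Dict.keys_counter]
  apply List.map_congr_left
  intro k _
  rw [PySem.Dict.getD_counter]

theorem pv_MA (y0 : List Int) :
    (PySem.List.pyGet? (PySem.List.sorted (PySem.Dict.counter y0).values (fun v => v) true) 0).getD 0
    = pvM y0 := by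
  rw [pv_counter_values]
  rfl

theorem pv_MB (y0 : List Int) :
    (PySem.List.pyGet? (PySem.List.sorted
      ((((PySem.List.enumerate y0).foldl
          (fun g p => g.modify p.2 [] (fun l => l ++ [p.1])) PySem.Dict.empty).values).map
        (fun g => (g.length : Int))) (fun v => v) true) 0).getD 0
    = pvM y0 := by
  have hnod : ((PySem.List.enumerate y0).foldl
      (fun g p => g.modify p.2 [] (fun l => l ++ [p.1])) PySem.Dict.empty).keys.Nodup := by
    rw [pv_groups_keys]
    exact PySem.Set.nodup_ofList y0
  rw [PySem.Dict.values_eq_map_keys _ hnod []]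
  rw [pv_groups_keys, List.map_map]
  rw [show ((fun g : List Int => (g.length : Int)) ∘ fun k =>
        ((PySem.List.enumerate y0).foldl
          (fun g p => g.modify p.2 [] (fun l => l ++ [p.1])) PySem.Dict.empty).getD k [])
      = fun k => ((((PySem.List.enumerate y0).foldl
          (fun g p => g.modify p.2 [] (fun l => l ++ [p.1])) PySem.Dict.empty).getD k []).length : Int) from rfl]
  rw [List.map_congr_left (fun k _ => by rw [pv_groups_getD, pv_idx_length])]
  rfl

theorem pv_M_mem (y0 : List Int) (h : y0 ≠ []) : ∃ c ∈ y0, pvM y0 = (y0.count c : Int) := by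
  have hne2 : PySem.List.sorted ((PySem.Set.ofList y0).map (fun k => (y0.count k : Int)))
      (fun v => v) true ≠ [] := by
    rw [Ne, PySem.List.sorted_eq_nil_iff]
    intro hnil
    obtain ⟨a, t, rfl⟩ := List.exists_cons_of_ne_nil h
    have : a ∈ PySem.Set.ofList (a :: t) := (PySem.Set.mem_ofList _ a).mpr (List.mem_cons_self ..)
    rw [List.map_eq_nil_iff] at hnil
    rw [hnil] at this
    cases this
  obtain ⟨m, t, heq⟩ := List.exists_cons_of_ne_nil hne2
  have hmm : m ∈ PySem.List.sorted ((PySem.Set.ofList y0).map (fun k => (y0.count k : Int)))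
      (fun v => v) true := by rw [heq]; exact List.mem_cons_self ..
  rw [PySem.List.mem_sorted] at hmm
  obtain ⟨c, hcm, hcv⟩ := List.mem_map.mp hmm
  refine ⟨c, (PySem.Set.mem_ofList y0 c).mp hcm, ?_⟩
  rw [pvM, heq, ← hcv]
  simp

-- ===== VERDICT (by name: the statement is the Claim_ definition above) =====
theorem SimpleOverSample_spec : Claim_equal_SimpleOverSample := by
  intro x y _hdom hpre
  obtain ⟨hne, hcase⟩ := hpre
  have hc : ∀ c ∈ PySem.Set.ofList y, pvM y - (y.count c : Int) > 0 →
      (c ∈ y ∧ ∀ i ∈ pvIdx y c, i < (x.length : Int)) := by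
    intro c hcm hpos
    have hcy : c ∈ y := (PySem.Set.mem_ofList y c).mp hcm
    refine ⟨hcy, ?_⟩
    rcases hcase with hlen | hbal
    · intro i hi
      have := (pv_mem_idx y c i hi).2.1
      omega
    · exfalso
      obtain ⟨c0, hc0, hM⟩ := pv_M_mem y hne
      have := hbal c hcy c0 hc0
      omega
  have hA : SimpleOverSample x y
      = (x ++ (PySem.Set.ofList y).flatMap (pvBlockX x y (pvM y)),
         y ++ (PySem.Set.ofList y).flatMap (pvBlockY y (pvM y))) := by
    simp only [SimpleOverSample]
    simp only [pv_MA, PySem.Dict.keys_counter]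
    have := pv_A_fold x y (pvM y) (PySem.Set.ofList y) [] []
      (PySem.Set.nodup_ofList y) (by intro e he; cases he) hc
    simpa using this
  have hB : SimpleOverSample_alt x y
      = (x ++ (PySem.Set.ofList y).flatMap (pvBlockX x y (pvM y)),
         y ++ (PySem.Set.ofList y).flatMap (pvBlockY y (pvM y))) := by
    simp only [SimpleOverSample_alt]
    simp only [pv_MB, pv_groups_items]
    rw [pv_B_fold x y (pvM y) (PySem.Set.ofList y) [] []
      (fun c hcm => (PySem.Set.mem_ofList y c).mp hcm)]
    simp
  show SimpleOverSample x y = SimpleOverSample_alt x y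
  rw [hA, hB]
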